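-- pv_equiv track=rewrite | github.com/gabe-raulet/task4 | examples/basic/cfg.py | reassemble
-- ===== SOURCE A (Python) =====
-- def reassemble(block_map, entry):
--     """
--     Reassembles a block map (with unique entry!) into a single
--     stream of instructions
--     """
--     yield {"label": entry}
--     for instr in block_map[entry]:
--         yield instr
--     for name, block in block_map.items():
--         if name == entry: continue
--         yield {"label": name}
--         for instr in block:
--             yield instr
-- ===== SOURCE B (Python) =====
-- def reassemble(block_map, entry):
--     # B: validate the contract (entry must be a key), then one partition pass:
--     # each block's label+instructions segment goes to head (entry) or tail (others).
--     # No dict lookup for the entry block and no skip guard in the loop.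
--     if entry not in block_map:
--         raise KeyError(entry)
--     head, tail = [], []
--     for name, block in block_map.items():
--         seg = head if name == entry else tail
--         seg.append({"label": name})
--         seg.extend(block)
--     yield from head
--     yield from tail
-- ===== Notes on version B (the rewrite author's own statement) =====
-- stated objective: alternative
-- what changed: B validates that entry is a key up front, then replaces A's entry lookup plus continue-guarded second loop by a single partition pass that routes each block's label+instructions segment into a head (entry) or tail (others) accumulator and concatenates them.
import Mathlib
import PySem

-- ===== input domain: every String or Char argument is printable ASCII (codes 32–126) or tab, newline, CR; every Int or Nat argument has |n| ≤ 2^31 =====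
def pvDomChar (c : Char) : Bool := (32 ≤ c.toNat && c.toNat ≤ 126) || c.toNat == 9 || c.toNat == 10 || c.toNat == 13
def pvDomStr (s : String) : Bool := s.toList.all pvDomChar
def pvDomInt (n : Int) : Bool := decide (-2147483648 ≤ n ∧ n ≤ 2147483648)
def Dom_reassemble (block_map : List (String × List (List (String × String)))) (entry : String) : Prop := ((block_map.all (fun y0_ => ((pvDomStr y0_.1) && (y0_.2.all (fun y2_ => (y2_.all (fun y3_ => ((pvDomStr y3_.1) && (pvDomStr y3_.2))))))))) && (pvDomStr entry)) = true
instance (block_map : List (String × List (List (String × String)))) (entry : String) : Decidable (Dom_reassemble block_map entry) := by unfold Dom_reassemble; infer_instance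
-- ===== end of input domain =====

-- B replaces A's entry lookup + continue-guarded loop by a single partition pass into
-- head/tail accumulators (objective: alternative decomposition, same cost).

-- ===== PORT A =====
-- generator consumed to a list: entry label, entry's block (dict lookup = first match),
-- then a loop over all items skipping the entry, emitting label then instructions
def reassemble (block_map : List (String × List (List (String × String)))) (entry : String) : List (List (String × String)) :=
  [("label", entry)] ::
    ((block_map.lookup entry).getD [] ++
      block_map.foldl
        (fun acc p => if p.1 == entry then acc else acc ++ ([("label", p.1)] :: p.2)) [])

-- ===== PORT B =====
-- validation (entry not a key -> Python raises KeyError; [] stands for the raise, outside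
-- Pre_), then one pass: each pair's segment (label :: instructions) is appended to head
-- if the name equals entry, else to tail; result is head ++ tail
def reassemble_alt (block_map : List (String × List (List (String × String)))) (entry : String) : List (List (String × String)) :=
  if ¬ (block_map.map Prod.fst).contains entry then [] else
  let ht := block_map.foldl
    (fun (acc : List (List (String × String)) × List (List (String × String))) p =>
      if p.1 == entry then (acc.1 ++ ([("label", p.1)] :: p.2), acc.2)
      else (acc.1, acc.2 ++ ([("label", p.1)] :: p.2)))
    ([], [])
  ht.1 ++ ht.2

-- ===== PRECONDITION & SPEC =====
-- Pre_ requires the entry key to occur exactly once: if it is missing Python A raises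
-- KeyError mid-stream, and a Python dict cannot repeat a key. Other keys are unconstrained.
def Pre_reassemble (block_map : List (String × List (List (String × String)))) (entry : String) : Prop :=
  (block_map.map Prod.fst).count entry = 1
instance (block_map : List (String × List (List (String × String)))) (entry : String) : Decidable (Pre_reassemble block_map entry) := by unfold Pre_reassemble; infer_instance

def pvWitness_reassemble : (List (String × List (List (String × String)))) × String :=
  ([("a", [[("op", "nop")]]), ("b", [])], "a")

def Spec_reassemble (block_map : List (String × List (List (String × String)))) (entry : String) (out : List (List (String × String))) : Prop := out = reassemble_alt block_map entry
instance (block_map : List (String × List (List (String × String)))) (entry : String) (out : List (List (String × String))) : Decidable (Spec_reassemble block_map entry out) := by unfold Spec_reassemble; infer_instance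

-- ===== CLAIM =====
def Claim_equal_reassemble : Prop := ∀ (block_map : List (String × List (List (String × String)))) (entry : String), Dom_reassemble block_map entry → Pre_reassemble block_map entry → Spec_reassemble block_map entry (reassemble block_map entry)

-- ===== LEMMAS AND PROOFS =====

-- A's skipping loop, as filter + flatMap
theorem foldl_skip_eq_flatMap {α : Type} (entry : String)
    (g : String × α → List (List (String × String))) :
    ∀ (l : List (String × α)) (acc : List (List (String × String))),
      l.foldl (fun acc p => if p.1 == entry then acc else acc ++ g p) acc
        = acc ++ (l.filter (fun p => p.1 != entry)).flatMap g := by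
  intro l
  induction l with
  | nil => intro acc; simp
  | cons p rest ih =>
    intro acc
    rw [List.foldl_cons, ih]
    by_cases h : p.1 = entry
    · simp [h]
    · simp [h]

-- B's partition loop: head collects the entry-keyed segments, tail the rest
theorem foldl_partition_eq (entry : String)
    (g : String × List (List (String × String)) → List (List (String × String))) :
    ∀ (l : List (String × List (List (String × String))))
      (h t : List (List (String × String))),
      l.foldl
        (fun (acc : List (List (String × String)) × List (List (String × String))) p =>
          if p.1 == entry then (acc.1 ++ g p, acc.2) else (acc.1, acc.2 ++ g p))
        (h, t)
        = (h ++ (l.filter (fun p => p.1 == entry)).flatMap g,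
           t ++ (l.filter (fun p => p.1 != entry)).flatMap g) := by
  intro l
  induction l with
  | nil => intro h t; simp
  | cons p rest ih =>
    intro h t
    simp only [List.foldl_cons]
    by_cases hp : p.1 = entry
    · rw [if_pos (by simp [hp]), ih]; simp [hp]
    · rw [if_neg (by simp [hp]), ih]; simp [hp]

-- if the key entry occurs exactly once, the entry-keyed pairs are exactly one pair,
-- whose value is what lookup returns
theorem filter_entry_eq_single {α : Type} (entry : String) :
    ∀ (l : List (String × α)), (l.map Prod.fst).count entry = 1 →
      ∃ b, l.lookup entry = some b ∧ l.filter (fun p => p.1 == entry) = [(entry, b)] := by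
  intro l
  induction l with
  | nil => intro hc; simp at hc
  | cons q rest ih =>
    intro hc
    by_cases h : q.1 = entry
    · have h0 : (rest.map Prod.fst).count entry = 0 := by
        simp [h] at hc; omega
      refine ⟨q.2, ?_, ?_⟩
      · simp [List.lookup, h]
      · have : rest.filter (fun p => p.1 == entry) = [] := by
          apply List.filter_eq_nil_iff.mpr
          intro p hp hpe
          have : entry ∈ rest.map Prod.fst := by
            simpa [(by simpa using hpe : p.1 = entry)] using
              List.mem_map_of_mem (f := Prod.fst) hp
          simp [List.count_eq_zero.mp h0 this]
        simp [h, this]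
        exact Prod.ext h rfl
    · have hc' : (rest.map Prod.fst).count entry = 1 := by
        simp [h] at hc
        exact hc
      obtain ⟨b, hl, hf⟩ := ih hc'
      refine ⟨b, ?_, ?_⟩
      · have h' : (entry == q.1) = false := beq_false_of_ne (fun he => h he.symm)
        simp [List.lookup, hl, h']
      · simp [h, hf]

-- ===== VERDICT =====
theorem reassemble_spec : Claim_equal_reassemble := by
  intro bm entry _ hpre
  show reassemble bm entry = reassemble_alt bm entry
  unfold reassemble reassemble_alt
  rw [if_neg (by
    simp only [not_not, List.contains_iff_mem]
    exact List.count_pos_iff.mp (by rw [hpre]; norm_num))]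
  rw [foldl_skip_eq_flatMap entry _ bm []]
  rw [foldl_partition_eq entry _ bm [] []]
  obtain ⟨b, hl, hf⟩ := filter_entry_eq_single entry bm hpre
  simp [hl, hf]
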